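-- pv_equiv track=rewrite | github.com/vvbabe/agent-for-harmful-information-detection | UltraRAG/src/ultrarag/client.py | _pad_to_skeleton
-- ===== SOURCE A (Python) =====
-- from typing import Dict, List, Union, Any, Tuple
--
-- def elem_match(elem: Dict, pairs: List[Tuple[int, str]]) -> bool:
--     return all(elem.get(f"branch{d}_state") == s for d, s in pairs)
--
-- def _pad_to_skeleton(
--     skeleton: list[dict], parent_pairs: list[tuple[int, str]], sub_list: list
-- ):
--     new_full = []
--     for elem in skeleton:
--         new_elem = {k: v for k, v in elem.items() if k != "data"}
--         new_elem["data"] = None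
--         new_full.append(new_elem)
--
--     it = iter(sub_list)
--     for i, elem in enumerate(skeleton):
--         if elem_match(elem, parent_pairs):
--             try:
--                 new_val = next(it)
--             except StopIteration:
--                 raise ValueError(
--                     "[UltraRAG Error] Router sub_list length < expected matches when padding to skeleton"
--                 )
--             new_full[i]["data"] = new_val
--
--     if any(True for _ in it):
--         raise ValueError(
--             "[UltraRAG Error] Router sub_list length > expected matches when padding to skeleton"
--         )
--
--     return new_full
-- ===== SOURCE B (Python) =====
-- def elem_match(elem, pairs):
--     return all(elem.get(f"branch{d}_state") == s for d, s in pairs)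
--
--
-- def _pad_to_skeleton(skeleton, parent_pairs, sub_list):
--     count = 0
--     for elem in skeleton:
--         if elem_match(elem, parent_pairs):
--             count += 1
--     if len(sub_list) < count:
--         raise ValueError(
--             "[UltraRAG Error] Router sub_list length < expected matches when padding to skeleton"
--         )
--     if len(sub_list) > count:
--         raise ValueError(
--             "[UltraRAG Error] Router sub_list length > expected matches when padding to skeleton"
--         )
--     new_full = []
--     j = 0
--     for elem in skeleton:
--         new_elem = {k: v for k, v in elem.items() if k != "data"}
--         if elem_match(elem, parent_pairs):
--             new_elem["data"] = sub_list[j]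
--             j += 1
--         else:
--             new_elem["data"] = None
--         new_full.append(new_elem)
--     return new_full
-- ===== Notes on version B (the rewrite author's own statement) =====
-- stated objective: simpler
-- what changed: Replaces A's two-pass scheme (build a None-padded copy, then mutate it by index while pulling from an iterator and catching StopIteration, plus a drain check for leftovers) by an upfront count of matching elements compared against len(sub_list) for both error cases, followed by a single construction loop that fills each element's data directly via an incrementing index.
import Mathlib
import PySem

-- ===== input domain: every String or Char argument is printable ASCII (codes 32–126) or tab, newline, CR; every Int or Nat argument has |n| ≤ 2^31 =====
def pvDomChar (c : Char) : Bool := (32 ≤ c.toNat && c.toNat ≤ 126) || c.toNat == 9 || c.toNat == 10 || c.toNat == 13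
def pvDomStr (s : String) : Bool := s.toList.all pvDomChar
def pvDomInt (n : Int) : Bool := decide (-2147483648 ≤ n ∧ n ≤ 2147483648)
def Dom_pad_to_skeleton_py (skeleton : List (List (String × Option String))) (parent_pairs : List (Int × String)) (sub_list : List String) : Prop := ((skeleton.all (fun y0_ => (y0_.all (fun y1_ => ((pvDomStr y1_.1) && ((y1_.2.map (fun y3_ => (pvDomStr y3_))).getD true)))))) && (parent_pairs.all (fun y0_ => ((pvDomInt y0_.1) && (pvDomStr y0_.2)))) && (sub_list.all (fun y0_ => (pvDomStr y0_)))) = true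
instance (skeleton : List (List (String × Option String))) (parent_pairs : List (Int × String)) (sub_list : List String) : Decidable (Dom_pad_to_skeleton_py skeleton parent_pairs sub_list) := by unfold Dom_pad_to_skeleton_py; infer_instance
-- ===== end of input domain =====

-- ===== PORT A =====
-- B replaces A's iterator/StopIteration + index-mutation scheme by an upfront count check
-- and a single direct construction loop (objective: simpler decomposition, same cost).

-- helper shared by both Python files (module-level `elem_match`): elem.get(f"branch{d}_state") == s
def elemMatch (elem : List (String × Option String)) (pairs : List (Int × String)) : Bool :=
  pairs.all (fun p =>
    (PySem.Dict.ofList elem).getD ("branch" ++ PySem.Int.toStr p.1 ++ "_state") none == some p.2)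

-- `{k: v for k, v in elem.items() if k != "data"}` (dict semantics: unique keys, insertion order)
def mkBase (elem : List (String × Option String)) : PySem.Dict String (Option String) :=
  elem.foldl (fun d kv => if kv.1 == "data" then d else PySem.Dict.insert d kv.1 kv.2)
    PySem.Dict.empty

-- A's second loop: `for i, elem in enumerate(skeleton): ... new_full[i]["data"] = next(it)`,
-- with the iterator `it` carried as the remaining list; on StopIteration Python raises
-- (excluded by Pre_), here the loop just stops.
def padFillA (parent_pairs : List (Int × String)) :
    List (PySem.Dict String (Option String)) → Nat → List (List (String × Option String)) →
    List String → (List (PySem.Dict String (Option String)) × List String)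
  | new_full, _, [], vs => (new_full, vs)
  | new_full, i, e :: es, vs =>
    if elemMatch e parent_pairs then
      match vs with
      | [] => (new_full, [])  -- Python: raise ValueError "... length < expected matches ..."
      | v :: rest =>
        padFillA parent_pairs (new_full.modify i (fun d => PySem.Dict.insert d "data" (some v)))
          (i + 1) es rest
    else padFillA parent_pairs new_full (i + 1) es vs

def pad_to_skeleton_py (skeleton : List (List (String × Option String))) (parent_pairs : List (Int × String)) (sub_list : List String) : List (List (String × Option String)) :=
  -- first loop: new_full.append({... minus "data"} with data = None)
  let new_full := skeleton.foldl
    (fun acc e => acc ++ [PySem.Dict.insert (mkBase e) "data" none]) []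
  let r := padFillA parent_pairs new_full 0 skeleton sub_list
  -- `if any(True for _ in it): raise ValueError "... length > expected matches ..."` (excluded by Pre_)
  r.1.map PySem.Dict.items

-- ===== PORT B =====
-- B's fill loop: state (new_full, j); matching elements get sub_list[j], others None.
def padFillB (parent_pairs : List (Int × String)) (sub_list : List String)
    (skeleton : List (List (String × Option String))) :
    List (List (String × Option String)) × Nat :=
  skeleton.foldl
    (fun st e =>
      if elemMatch e parent_pairs then
        (st.1 ++ [(PySem.Dict.insert (mkBase e) "data" (some (sub_list.getD st.2 ""))).items],
         st.2 + 1)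
      else (st.1 ++ [(PySem.Dict.insert (mkBase e) "data" none).items], st.2))
    ([], 0)

def pad_to_skeleton_py_alt (skeleton : List (List (String × Option String))) (parent_pairs : List (Int × String)) (sub_list : List String) : List (List (String × Option String)) :=
  let count := skeleton.foldl (fun n e => if elemMatch e parent_pairs then n + 1 else n) 0
  if sub_list.length < count then []       -- Python: raise ValueError "... < ..." (excluded by Pre_)
  else if sub_list.length > count then []  -- Python: raise ValueError "... > ..." (excluded by Pre_)
  else (padFillB parent_pairs sub_list skeleton).1

-- ===== PRECONDITION & SPEC =====
-- A raises ValueError exactly when len(sub_list) differs from the number of matching elements;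
-- B raises there too, so Pre_ admits exactly the inputs on which both return.
def Pre_pad_to_skeleton_py (skeleton : List (List (String × Option String))) (parent_pairs : List (Int × String)) (sub_list : List String) : Prop :=
  sub_list.length = skeleton.countP (fun e => elemMatch e parent_pairs)
instance (skeleton : List (List (String × Option String))) (parent_pairs : List (Int × String)) (sub_list : List String) : Decidable (Pre_pad_to_skeleton_py skeleton parent_pairs sub_list) := by unfold Pre_pad_to_skeleton_py; infer_instance

def pvWitness_pad_to_skeleton_py : (List (List (String × Option String))) × (List (Int × String)) × List String :=
  ([[("a", some "x"), ("data", none)], [("b", none)]], [], ["u", "v"])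

def Spec_pad_to_skeleton_py (skeleton : List (List (String × Option String))) (parent_pairs : List (Int × String)) (sub_list : List String) (out : List (List (String × Option String))) : Prop := out = pad_to_skeleton_py_alt skeleton parent_pairs sub_list
instance (skeleton : List (List (String × Option String))) (parent_pairs : List (Int × String)) (sub_list : List String) (out : List (List (String × Option String))) : Decidable (Spec_pad_to_skeleton_py skeleton parent_pairs sub_list out) := by unfold Spec_pad_to_skeleton_py; infer_instance

-- ===== CLAIM (what is proved, stated in full; the proofs are below) =====
def Claim_equal_pad_to_skeleton_py : Prop := ∀ (skeleton : List (List (String × Option String))) (parent_pairs : List (Int × String)) (sub_list : List String), Dom_pad_to_skeleton_py skeleton parent_pairs sub_list → Pre_pad_to_skeleton_py skeleton parent_pairs sub_list → Spec_pad_to_skeleton_py skeleton parent_pairs sub_list (pad_to_skeleton_py skeleton parent_pairs sub_list)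

-- ===== LEMMAS AND PROOFS =====

-- common shape both sides converge to
def specFill (parent_pairs : List (Int × String)) :
    List (List (String × Option String)) → List String →
    List (PySem.Dict String (Option String))
  | [], _ => []
  | e :: es, vs =>
    if elemMatch e parent_pairs then
      PySem.Dict.insert (mkBase e) "data" (some (vs.headD "")) :: specFill parent_pairs es vs.tail
    else
      PySem.Dict.insert (mkBase e) "data" none :: specFill parent_pairs es vs

theorem modify_append_cons {α : Type} (done : List α) (x : α) (l : List α) (f : α → α) :
    (done ++ x :: l).modify done.length f = done ++ f x :: l := by
  induction done with
  | nil => simp [List.modify]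
  | cons a t ih => simpa [List.modify] using ih

theorem padFillA_eq_specFill (pp : List (Int × String))
    (es : List (List (String × Option String))) (vs : List String)
    (done : List (PySem.Dict String (Option String)))
    (h : es.countP (fun e => elemMatch e pp) ≤ vs.length) :
    padFillA pp (done ++ es.map (fun e => PySem.Dict.insert (mkBase e) "data" none))
        done.length es vs
      = (done ++ specFill pp es vs, vs.drop (es.countP (fun e => elemMatch e pp))) := by
  induction es generalizing vs done with
  | nil => simp [padFillA, specFill]
  | cons e es ih =>
    by_cases hm : elemMatch e pp = true
    · cases vs with
      | nil => simp [hm] at h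
      | cons v rest =>
        have hrest : es.countP (fun e => elemMatch e pp) ≤ rest.length := by
          simp [hm] at h; omega
        simp only [List.map_cons, padFillA, hm, if_pos]
        rw [modify_append_cons done _ _ (fun d => PySem.Dict.insert d "data" (some v)),
          PySem.Dict.insert_insert_self]
        rw [show done ++ PySem.Dict.insert (mkBase e) "data" (some v) ::
              es.map (fun e => PySem.Dict.insert (mkBase e) "data" none)
            = (done ++ [PySem.Dict.insert (mkBase e) "data" (some v)]) ++
              es.map (fun e => PySem.Dict.insert (mkBase e) "data" none) by simp]
        rw [show done.length + 1
            = (done ++ [PySem.Dict.insert (mkBase e) "data" (some v)]).length by simp]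
        rw [ih rest _ hrest]
        simp [specFill, hm, List.countP_cons]
    · have hrest : es.countP (fun e => elemMatch e pp) ≤ vs.length := by
        simp [hm] at h; omega
      simp only [List.map_cons, padFillA, hm, Bool.false_eq_true, if_false]
      rw [show done ++ PySem.Dict.insert (mkBase e) "data" none ::
            es.map (fun e => PySem.Dict.insert (mkBase e) "data" none)
          = (done ++ [PySem.Dict.insert (mkBase e) "data" none]) ++
            es.map (fun e => PySem.Dict.insert (mkBase e) "data" none) by simp]
      rw [show done.length + 1
          = (done ++ [PySem.Dict.insert (mkBase e) "data" none]).length by simp]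
      rw [ih vs _ hrest]
      simp [specFill, hm, List.countP_cons]

theorem padFillB_eq_specFill (pp : List (Int × String)) (sub_list : List String)
    (es : List (List (String × Option String)))
    (acc : List (List (String × Option String))) (j : Nat)
    (h : es.countP (fun e => elemMatch e pp) ≤ sub_list.length - j) :
    (es.foldl
      (fun st e =>
        if elemMatch e pp then
          (st.1 ++ [(PySem.Dict.insert (mkBase e) "data" (some (sub_list.getD st.2 ""))).items],
           st.2 + 1)
        else (st.1 ++ [(PySem.Dict.insert (mkBase e) "data" none).items], st.2))
      (acc, j)).1
      = acc ++ (specFill pp es (sub_list.drop j)).map PySem.Dict.items := by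
  induction es generalizing acc j with
  | nil => simp [specFill]
  | cons e es ih =>
    by_cases hm : elemMatch e pp = true
    · have hj : j < sub_list.length := by
        simp [hm] at h; omega
      have hrest : es.countP (fun e => elemMatch e pp) ≤ sub_list.length - (j + 1) := by
        simp [hm] at h; omega
      have hhead : (sub_list.drop j).headD "" = sub_list.getD j "" := by
        simp [List.headD_eq_head?_getD, List.head?_drop, List.getD_eq_getElem?_getD]
      have htail : (sub_list.drop j).tail = sub_list.drop (j + 1) := List.tail_drop
      simp only [List.foldl_cons, hm, if_pos]
      rw [ih _ (j + 1) hrest]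
      simp [specFill, hm, htail]
    · have hrest : es.countP (fun e => elemMatch e pp) ≤ sub_list.length - j := by
        simp [hm] at h; omega
      simp only [List.foldl_cons, hm, if_neg, Bool.false_eq_true, not_false_iff]
      rw [ih _ j hrest]
      simp [specFill, hm]

theorem foldl_count_eq_countP (pp : List (Int × String))
    (es : List (List (String × Option String))) (n : Nat) :
    es.foldl (fun n e => if elemMatch e pp then n + 1 else n) n
      = n + es.countP (fun e => elemMatch e pp) := by
  induction es generalizing n with
  | nil => simp
  | cons e es ih =>
    by_cases hm : elemMatch e pp = true <;> simp [hm, ih] <;> omega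

-- ===== VERDICT (by name: the statement is the Claim_ definition above) =====
theorem pad_to_skeleton_py_spec : Claim_equal_pad_to_skeleton_py := by
  intro skeleton parent_pairs sub_list _ hpre
  unfold Spec_pad_to_skeleton_py pad_to_skeleton_py pad_to_skeleton_py_alt padFillB
  dsimp only
  have hpre' : sub_list.length = skeleton.countP (fun e => elemMatch e parent_pairs) := hpre
  have hle : skeleton.countP (fun e => elemMatch e parent_pairs) ≤ sub_list.length := hpre'.ge
  rw [PySem.List.foldl_append_singleton_eq_map]
  have hA := padFillA_eq_specFill parent_pairs skeleton sub_list [] hle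
  simp only [List.nil_append, List.length_nil] at hA
  rw [List.nil_append, hA]
  have hB := padFillB_eq_specFill parent_pairs sub_list skeleton [] 0 (by omega)
  simp only [List.nil_append, List.drop_zero] at hB
  rw [foldl_count_eq_countP, hB]
  simp [hpre']
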